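-- pv_equiv track=rewrite | github.com/romeorizzi/esami-algo-public | 2022-02-02/block_diag_mat/sol/sol_lineare.py | max_num_square_blocks_as_it_is
-- ===== SOURCE A (Python) =====
-- def max_num_square_blocks_as_it_is(m,n,M):
--     def is_nonzero(val):
--         return 0 if val == 0 else 1
--     num_blocks = 0
--     Sw_nonzeros = 0 # maintains the number of nonzero entries of M that are situated to the strict South and to the west (or also on the same column) of the current diagonal pos (initially -1)
--     En_nonzeros = 0 # maintains the number of nonzero entries of M that are situated to the strict East and to the nort (or also on the same row) of the current diagonal pos (initially -1)
--     for cur_pos in range(m):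
--         Sw_nonzeros += sum(is_nonzero(M[i][cur_pos]) for i in range(cur_pos+1,m)) - sum(is_nonzero(M[cur_pos][j]) for j in range(cur_pos))
--         En_nonzeros += sum(is_nonzero(M[cur_pos][j]) for j in range(cur_pos+1,n)) - sum(is_nonzero(M[i][cur_pos]) for i in range(cur_pos))
--         if Sw_nonzeros == 0 and En_nonzeros == 0:
--             num_blocks += 1
--     return num_blocks
-- ===== SOURCE B (Python) =====
-- def max_num_square_blocks_as_it_is(m, n, M):
--     num_blocks = 0
--     for cur_pos in range(m):
--         lower_left = sum(1 for i in range(cur_pos + 1, m)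
--                            for j in range(cur_pos + 1) if M[i][j] != 0)
--         upper_right = sum(1 for i in range(cur_pos + 1)
--                             for j in range(cur_pos + 1, n) if M[i][j] != 0)
--         if lower_left == 0 and upper_right == 0:
--             num_blocks += 1
--     return num_blocks
-- ===== Notes on version B (the rewrite author's own statement) =====
-- stated objective: simpler
-- what changed: B drops A's two incrementally delta-updated running accumulators and instead, for each cut position, directly counts the nonzeros in the lower-left and upper-right blocks with independent full region scans.
-- outside the precondition, e.g. on max_num_square_blocks_as_it_is(2, 1, [[1, 1], [1, 1]]): A returns 0, B returns 1; on max_num_square_blocks_as_it_is(2, 1, [[1, 0], [0, 1]]): A returns 2, B returns 2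
import Mathlib
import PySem

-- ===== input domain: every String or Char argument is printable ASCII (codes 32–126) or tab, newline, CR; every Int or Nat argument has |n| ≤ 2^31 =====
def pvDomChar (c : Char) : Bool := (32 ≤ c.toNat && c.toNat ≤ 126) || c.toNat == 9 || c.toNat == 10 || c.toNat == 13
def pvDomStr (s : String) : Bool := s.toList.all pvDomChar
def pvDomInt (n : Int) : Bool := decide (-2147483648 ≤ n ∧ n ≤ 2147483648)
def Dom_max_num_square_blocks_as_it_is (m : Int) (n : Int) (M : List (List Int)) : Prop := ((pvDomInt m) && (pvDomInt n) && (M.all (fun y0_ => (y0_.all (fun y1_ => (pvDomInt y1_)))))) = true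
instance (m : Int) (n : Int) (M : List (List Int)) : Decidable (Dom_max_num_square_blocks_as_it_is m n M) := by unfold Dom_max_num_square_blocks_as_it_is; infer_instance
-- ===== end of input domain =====

-- B replaces A's two delta-updated running accumulators by a direct, independent count of the
-- nonzeros in the lower-left and upper-right blocks at each cut (objective: simpler, not faster).

-- ===== PORT A =====
def pvIsNonzeroA (val : Int) : Int := if val == 0 then 0 else 1

-- the body of A's 'for cur_pos in range(m)' loop (state = (num_blocks, Sw_nonzeros, En_nonzeros))
def pvStepA (m n : Int) (M : List (List Int)) (st : Int × Int × Int) (cur_pos : Int) : Int × Int × Int :=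
  let sw := st.2.1
    + (PySem.List.pyRange (cur_pos + 1) m 1).foldl
        (fun a i => a + pvIsNonzeroA (PySem.List.pyGetD (PySem.List.pyGetD M i []) cur_pos 0)) 0
    - (PySem.List.pyRange 0 cur_pos 1).foldl
        (fun a j => a + pvIsNonzeroA (PySem.List.pyGetD (PySem.List.pyGetD M cur_pos []) j 0)) 0
  let en := st.2.2
    + (PySem.List.pyRange (cur_pos + 1) n 1).foldl
        (fun a j => a + pvIsNonzeroA (PySem.List.pyGetD (PySem.List.pyGetD M cur_pos []) j 0)) 0
    - (PySem.List.pyRange 0 cur_pos 1).foldl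
        (fun a i => a + pvIsNonzeroA (PySem.List.pyGetD (PySem.List.pyGetD M i []) cur_pos 0)) 0
  let nb := if sw == 0 && en == 0 then st.1 + 1 else st.1
  (nb, sw, en)

def max_num_square_blocks_as_it_is (m : Int) (n : Int) (M : List (List Int)) : Int :=
  ((PySem.List.pyRange 0 m 1).foldl (pvStepA m n M) (0, 0, 0)).1

-- ===== PORT B =====
def pvEntry (M : List (List Int)) (i j : Int) : Int :=
  PySem.List.pyGetD (PySem.List.pyGetD M i []) j 0

-- 'sum(1 for i in rows for j in cols if M[i][j] != 0)'
def pvCountNZ (M : List (List Int)) (rows cols : List Int) : Int :=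
  rows.foldl (fun a i => a + cols.foldl (fun b j => b + (if pvEntry M i j ≠ 0 then 1 else 0)) 0) 0

def max_num_square_blocks_as_it_is_alt (m : Int) (n : Int) (M : List (List Int)) : Int :=
  (PySem.List.pyRange 0 m 1).foldl
    (fun nb cur_pos =>
      let lower_left := pvCountNZ M (PySem.List.pyRange (cur_pos + 1) m 1) (PySem.List.pyRange 0 (cur_pos + 1) 1)
      let upper_right := pvCountNZ M (PySem.List.pyRange 0 (cur_pos + 1) 1) (PySem.List.pyRange (cur_pos + 1) n 1)
      if lower_left == 0 && upper_right == 0 then nb + 1 else nb) 0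

-- ===== PRECONDITION & SPEC =====
-- Pre_ is the natural wide-matrix domain m ≤ n (each of the first m rows long enough for every
-- access A makes; the access-free m = 1, n ≤ 0 shape is also admitted); outside it A's index
-- arithmetic raises IndexError except when rows happen to be longer than n, where A's returned
-- value is an accident of its leftover accumulator state (column subtractions past column n-1)
-- and is excluded — see the cites in the claim.
def Pre_max_num_square_blocks_as_it_is (m : Int) (n : Int) (M : List (List Int)) : Prop :=
  0 < m →
    ((m = 1 ∧ n ≤ 0) ∨
      (m ≤ n ∧ m ≤ (M.length : Int) ∧
        ∀ i : Nat, i < m.toNat →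
          (n ≤ ((M.getD i []).length : Int) ∨
            ((i : Int) + 1 = n ∧ m - 1 ≤ ((M.getD i []).length : Int)))))
instance (m : Int) (n : Int) (M : List (List Int)) : Decidable (Pre_max_num_square_blocks_as_it_is m n M) := by
  unfold Pre_max_num_square_blocks_as_it_is; infer_instance

def pvWitness_max_num_square_blocks_as_it_is : Int × Int × List (List Int) :=
  (2, 2, [[1, 0], [0, 1]])

def Spec_max_num_square_blocks_as_it_is (m : Int) (n : Int) (M : List (List Int)) (out : Int) : Prop :=
  out = max_num_square_blocks_as_it_is_alt m n M
instance (m : Int) (n : Int) (M : List (List Int)) (out : Int) : Decidable (Spec_max_num_square_blocks_as_it_is m n M out) := by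
  unfold Spec_max_num_square_blocks_as_it_is; infer_instance

-- ===== CLAIM (what is proved, stated in full; the proofs are below) =====
def Claim_equal_max_num_square_blocks_as_it_is : Prop :=
  ∀ (m : Int) (n : Int) (M : List (List Int)),
    Dom_max_num_square_blocks_as_it_is m n M →
    Pre_max_num_square_blocks_as_it_is m n M →
    Spec_max_num_square_blocks_as_it_is m n M (max_num_square_blocks_as_it_is m n M)

-- ===== LEMMAS AND PROOFS =====

-- proof-side abbreviations: the 0/1 indicator table and block sums
def pvG (M : List (List Int)) (i j : Int) : Int := pvIsNonzeroA (pvEntry M i j)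

def pvS (M : List (List Int)) (rows cols : List Int) : Int :=
  (rows.map (fun i => (cols.map (fun j => pvG M i j)).sum)).sum

def pvSW (M : List (List Int)) (m p : Int) : Int :=
  pvS M (PySem.List.pyRange (p + 1) m 1) (PySem.List.pyRange 0 (p + 1) 1)

def pvEN (M : List (List Int)) (n p : Int) : Int :=
  pvS M (PySem.List.pyRange 0 (p + 1) 1) (PySem.List.pyRange (p + 1) n 1)

lemma pvIte_eq (e : Int) : (if e ≠ 0 then (1 : Int) else 0) = pvIsNonzeroA e := by
  unfold pvIsNonzeroA; by_cases h : e = 0 <;> simp [h]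

lemma pvCountNZ_eq_pvS (M : List (List Int)) (rows cols : List Int) :
    pvCountNZ M rows cols = pvS M rows cols := by
  unfold pvCountNZ pvS pvG
  rw [PySem.List.foldl_add]
  simp only [PySem.List.foldl_add, pvIte_eq, Int.zero_add]

lemma pvS_nil_left (M : List (List Int)) (cols : List Int) : pvS M [] cols = 0 := by
  simp [pvS]

lemma pvS_nil_right (M : List (List Int)) (rows : List Int) : pvS M rows [] = 0 := by
  simp [pvS]

lemma pvSW_neg_one (M : List (List Int)) (m : Int) : pvSW M m (-1) = 0 := by
  unfold pvSW
  norm_num [pvS_nil_right, PySem.List.pyRange_one_eq_nil]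

lemma pvEN_neg_one (M : List (List Int)) (n : Int) : pvEN M n (-1) = 0 := by
  unfold pvEN
  norm_num [pvS_nil_left, PySem.List.pyRange_one_eq_nil]

lemma pvS_cols_snoc (M : List (List Int)) (rows cs : List Int) (c : Int) :
    pvS M rows (cs ++ [c]) = pvS M rows cs + (rows.map (fun i => pvG M i c)).sum := by
  unfold pvS
  induction rows with
  | nil => simp
  | cons r rs ih => simp; ring

lemma pvSW_tele (M : List (List Int)) (m p : Int) (h0 : 0 ≤ p) (hm : p < m) :
    pvSW M m p = pvSW M m (p - 1)
      + ((PySem.List.pyRange (p + 1) m 1).map (fun i => pvG M i p)).sum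
      - ((PySem.List.pyRange 0 p 1).map (fun j => pvG M p j)).sum := by
  have hcols : PySem.List.pyRange 0 (p + 1) 1 = PySem.List.pyRange 0 p 1 ++ [p] :=
    PySem.List.pyRange_one_succ_right h0
  have hrows : PySem.List.pyRange p m 1 = p :: PySem.List.pyRange (p + 1) m 1 :=
    PySem.List.pyRange_one_cons hm
  unfold pvSW
  rw [hcols, pvS_cols_snoc, show p - 1 + 1 = p by ring, hrows]
  unfold pvS
  simp; ring

lemma pvEN_tele (M : List (List Int)) (n p : Int) (h0 : 0 ≤ p) (hn : p < n) :
    pvEN M n p = pvEN M n (p - 1)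
      + ((PySem.List.pyRange (p + 1) n 1).map (fun j => pvG M p j)).sum
      - ((PySem.List.pyRange 0 p 1).map (fun i => pvG M i p)).sum := by
  have hrows : PySem.List.pyRange 0 (p + 1) 1 = PySem.List.pyRange 0 p 1 ++ [p] :=
    PySem.List.pyRange_one_succ_right h0
  have hcols : PySem.List.pyRange p n 1 = p :: PySem.List.pyRange (p + 1) n 1 :=
    PySem.List.pyRange_one_cons hn
  unfold pvEN
  rw [hrows, show p - 1 + 1 = p by ring, hcols]
  unfold pvS
  simp; ring

lemma pvStepA_char (m n : Int) (M : List (List Int)) (nb p : Int)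
    (h0 : 0 ≤ p) (hm : p < m) (hn : p < n) :
    pvStepA m n M (nb, pvSW M m (p - 1), pvEN M n (p - 1)) p =
      (if pvSW M m p == 0 && pvEN M n p == 0 then nb + 1 else nb, pvSW M m p, pvEN M n p) := by
  unfold pvStepA
  simp only [PySem.List.foldl_add, Int.zero_add]
  rw [pvSW_tele M m p h0 hm, pvEN_tele M n p h0 hn]
  simp only [pvG, pvEntry]
  ring_nf

lemma pvInvariant (m n : Int) (M : List (List Int)) (hmn : m ≤ n) :
    ∀ (K : Nat), (K : Int) ≤ m →
      (PySem.List.pyRange 0 K 1).foldl (pvStepA m n M) (0, 0, 0) =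
        ((PySem.List.pyRange 0 K 1).foldl
          (fun nb cur_pos =>
            let lower_left := pvCountNZ M (PySem.List.pyRange (cur_pos + 1) m 1) (PySem.List.pyRange 0 (cur_pos + 1) 1)
            let upper_right := pvCountNZ M (PySem.List.pyRange 0 (cur_pos + 1) 1) (PySem.List.pyRange (cur_pos + 1) n 1)
            if lower_left == 0 && upper_right == 0 then nb + 1 else nb) 0,
         pvSW M m ((K : Int) - 1), pvEN M n ((K : Int) - 1)) := by
  intro K
  induction K with
  | zero =>
    intro _
    simp [PySem.List.pyRange_one_eq_nil, pvSW_neg_one, pvEN_neg_one]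
  | succ K ih =>
    intro hK
    have hKm : (K : Int) < m := by push_cast at hK ⊢; omega
    have hsplit : PySem.List.pyRange 0 ((K + 1 : Nat) : Int) 1 =
        PySem.List.pyRange 0 (K : Int) 1 ++ [(K : Int)] := by
      push_cast
      exact PySem.List.pyRange_one_succ_right (by positivity)
    rw [hsplit, List.foldl_append, List.foldl_append, ih (le_of_lt hKm)]
    simp only [List.foldl_cons, List.foldl_nil]
    rw [pvStepA_char m n M _ (K : Int) (by positivity) hKm (lt_of_lt_of_le hKm hmn)]
    simp only [pvCountNZ_eq_pvS]
    have : ((K + 1 : Nat) : Int) - 1 = (K : Int) := by push_cast; ring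
    rw [this]
    rfl

-- ===== VERDICT (by name: the statement is the Claim_ definition above) =====
theorem max_num_square_blocks_as_it_is_spec : Claim_equal_max_num_square_blocks_as_it_is := by
  intro m n M _ hpre
  unfold Spec_max_num_square_blocks_as_it_is max_num_square_blocks_as_it_is max_num_square_blocks_as_it_is_alt
  by_cases hm : m ≤ 0
  · rw [PySem.List.pyRange_one_eq_nil hm]
    rfl
  · rw [not_le] at hm
    rcases hpre hm with ⟨hm1, hn0⟩ | ⟨hmn, -, -⟩
    · subst hm1
      rw [show PySem.List.pyRange 0 (1:Int) 1 = [0] from PySem.List.pyRange_one_singleton 0]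
      simp only [List.foldl_cons, List.foldl_nil, pvStepA]
      rw [PySem.List.pyRange_one_eq_nil (by omega : n ≤ 0 + 1)]
      norm_num [PySem.List.pyRange_one_eq_nil, pvCountNZ]
    have hmt : ((m.toNat : Nat) : Int) = m := Int.toNat_of_nonneg (le_of_lt hm)
    rw [show PySem.List.pyRange 0 m 1 = PySem.List.pyRange 0 ((m.toNat : Nat) : Int) 1 by
          rw [hmt],
        pvInvariant m n M hmn m.toNat (by omega)]
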